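-- pv_equiv track=rewrite | github.com/stenwire/alx-higher_level_programming | 0x04-python-more_data_structures/10-best_score.py | best_score
-- ===== SOURCE A (Python) =====
-- def best_score(a_dictionary):
--     my_list = []
--     if a_dictionary:
--         for val in a_dictionary.values():
--             my_list.append(val)
--         max = my_list[0]
--         for i in range(0, len(my_list)):
--             if(my_list[i] > max):
--                 max = my_list[i]
--         for key in a_dictionary.keys():
--             key_val = max
--             if a_dictionary[key] == key_val:
--                 return key
--     else:
--         return None
-- ===== SOURCE B (Python) =====
-- def best_score(a_dictionary):
--     if not a_dictionary:
--         return None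
--     items = iter(a_dictionary.items())
--     best_key, best_val = next(items)
--     for k, v in items:
--         if v > best_val:
--             best_key, best_val = k, v
--     return best_key
-- ===== Notes on version B (the rewrite author's own statement) =====
-- stated objective: simpler
-- what changed: Replaces A's three passes (copy values into a list, scan that list for the max, re-scan keys doing a dict lookup per key) by one pass over items() tracking the current best key/value with strict '>'.
import Mathlib
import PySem

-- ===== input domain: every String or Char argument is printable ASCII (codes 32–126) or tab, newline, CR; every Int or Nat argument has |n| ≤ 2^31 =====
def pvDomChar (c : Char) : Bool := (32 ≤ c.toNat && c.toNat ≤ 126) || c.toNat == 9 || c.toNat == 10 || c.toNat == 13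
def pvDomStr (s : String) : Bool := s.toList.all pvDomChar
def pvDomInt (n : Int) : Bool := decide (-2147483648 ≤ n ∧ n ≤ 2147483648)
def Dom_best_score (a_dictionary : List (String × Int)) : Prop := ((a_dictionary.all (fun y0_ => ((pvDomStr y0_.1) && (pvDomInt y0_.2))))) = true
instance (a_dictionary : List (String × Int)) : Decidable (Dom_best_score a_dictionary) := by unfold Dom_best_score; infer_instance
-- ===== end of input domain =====

-- B replaces A's three passes (build values list, find its max, re-scan keys with a lookup
-- per key) by one traversal of the items tracking the current best key/value (simpler).

-- ===== PORT A =====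
-- 'for key in keys: if a_dictionary[key] == max: return key' — dict lookup is first match
def bestScoreScan (d : List (String × Int)) (keys : List String) (mx : Int) : Option String :=
  match keys with
  | [] => none
  | k :: t => if d.lookup k = some mx then some k else bestScoreScan d t mx

def best_score (a_dictionary : List (String × Int)) : Option String :=
  if a_dictionary ≠ [] then
    let my_list := a_dictionary.foldl (fun acc p => acc ++ [p.2]) []
    let mx := (PySem.List.pyRange 0 (my_list.length : Int) 1).foldl
        (fun m i => if PySem.List.pyGetD my_list i 0 > m then PySem.List.pyGetD my_list i 0 else m)
        (PySem.List.pyGetD my_list 0 0)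
    bestScoreScan a_dictionary (a_dictionary.map Prod.fst) mx
  else none

-- ===== PORT B =====
def bestScoreAltLoop (items : List (String × Int)) (bk : String) (bv : Int) : String :=
  match items with
  | [] => bk
  | (k, v) :: t => if v > bv then bestScoreAltLoop t k v else bestScoreAltLoop t bk bv

def best_score_alt (a_dictionary : List (String × Int)) : Option String :=
  match a_dictionary with
  | [] => none
  | (k, v) :: t => some (bestScoreAltLoop t k v)

-- ===== PRECONDITION & SPEC =====
-- Pre_ excludes association lists with duplicate keys: they do not represent a Python dict
-- (dict construction would collapse them), so A's behaviour on them is not defined by the source.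
def Pre_best_score (a_dictionary : List (String × Int)) : Prop :=
  (a_dictionary.map Prod.fst).Nodup

instance (a_dictionary : List (String × Int)) : Decidable (Pre_best_score a_dictionary) := by
  unfold Pre_best_score; infer_instance

def pvWitness_best_score : (List (String × Int)) := [("a", 3), ("b", 5), ("c", 5)]

def Spec_best_score (a_dictionary : List (String × Int)) (out : Option String) : Prop := out = best_score_alt a_dictionary
instance (a_dictionary : List (String × Int)) (out : Option String) : Decidable (Spec_best_score a_dictionary out) := by unfold Spec_best_score; infer_instance

-- ===== CLAIM (what is proved, stated in full; the proofs are below) =====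
def Claim_equal_best_score : Prop := ∀ (a_dictionary : List (String × Int)), Dom_best_score a_dictionary → Pre_best_score a_dictionary → Spec_best_score a_dictionary (best_score a_dictionary)

-- ===== LEMMAS AND PROOFS =====

-- running max over the values of a pair list, seeded with m
def pvFmax (m : Int) (t : List (String × Int)) : Int :=
  t.foldl (fun m p => if p.2 > m then p.2 else m) m

-- first pair whose value equals M
def pvFirstEq (M : Int) : List (String × Int) → Option String
  | [] => none
  | (k, v) :: t => if v = M then some k else pvFirstEq M t

theorem pvFirstEq_cons (M : Int) (k : String) (v : Int) (t : List (String × Int)) :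
    pvFirstEq M ((k, v) :: t) = if v = M then some k else pvFirstEq M t := rfl

theorem pvFmax_le (m : Int) (t : List (String × Int)) : m ≤ pvFmax m t := by
  induction t generalizing m with
  | nil => simp [pvFmax]
  | cons p t ih =>
      simp only [pvFmax, List.foldl_cons]
      split_ifs with h
      · exact le_of_lt (lt_of_lt_of_le h (ih p.2))
      · exact ih m

theorem pvFoldlAppend (l : List (String × Int)) (acc : List Int) :
    l.foldl (fun a p => a ++ [p.2]) acc = acc ++ l.map Prod.snd := by
  induction l generalizing acc with
  | nil => simp
  | cons p t ih => simp [ih]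

theorem pvLookupNodup (d : List (String × Int)) (h : (d.map Prod.fst).Nodup)
    (k : String) (v : Int) (hm : (k, v) ∈ d) : d.lookup k = some v := by
  induction d with
  | nil => simp at hm
  | cons p t ih =>
      simp only [List.map_cons, List.nodup_cons] at h
      rcases List.mem_cons.1 hm with h1 | h1
      · subst h1; simp [List.lookup]
      · have hk : p.1 ≠ k := by
          intro he; exact h.1 (he ▸ (List.mem_map.2 ⟨(k, v), h1, rfl⟩))
        have hb : (k == p.1) = false := beq_eq_false_iff_ne.2 (Ne.symm hk)
        obtain ⟨p1, p2⟩ := p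
        rw [List.lookup_cons, hb]
        exact ih h.2 h1

theorem pvScanEq (d : List (String × Int)) (s : List (String × Int)) (M : Int)
    (h : ∀ p ∈ s, d.lookup p.1 = some p.2) :
    bestScoreScan d (s.map Prod.fst) M = pvFirstEq M s := by
  induction s with
  | nil => rfl
  | cons p t ih =>
      have hp := h p (List.mem_cons_self)
      simp only [List.map_cons, bestScoreScan, pvFirstEq, hp, Option.some.injEq]
      exact if_congr Iff.rfl rfl (ih (fun q hq => h q (List.mem_cons_of_mem _ hq)))

theorem pvAltEq (t : List (String × Int)) (bk : String) (bv : Int) :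
    some (bestScoreAltLoop t bk bv) = pvFirstEq (pvFmax bv t) ((bk, bv) :: t) := by
  induction t generalizing bk bv with
  | nil => simp [bestScoreAltLoop, pvFmax, pvFirstEq]
  | cons p t ih =>
      obtain ⟨k, v⟩ := p
      by_cases hv : v > bv
      · have hM : bv < pvFmax v t := lt_of_lt_of_le hv (pvFmax_le v t)
        have : pvFmax bv ((k, v) :: t) = pvFmax v t := by
          simp [pvFmax, hv]
        rw [this]
        simp only [bestScoreAltLoop, if_pos hv]
        rw [ih k v, pvFirstEq_cons (pvFmax v t) bk bv, if_neg (ne_of_lt hM)]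
      · have hMb : pvFmax bv ((k, v) :: t) = pvFmax bv t := by
          simp [pvFmax, hv]
        rw [hMb]
        simp only [bestScoreAltLoop, if_neg hv]
        rw [ih bk bv]
        rw [pvFirstEq_cons, pvFirstEq_cons]
        by_cases hb : bv = pvFmax bv t
        · rw [if_pos hb, if_pos hb]
        · have hbv : bv < pvFmax bv t := lt_of_le_of_ne (pvFmax_le bv t) hb
          have hvM : v ≠ pvFmax bv t := ne_of_lt (lt_of_le_of_lt (not_lt.1 hv) hbv)
          rw [if_neg hb, if_neg hb, pvFirstEq_cons, if_neg hvM]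

theorem pvMaxLoopEq (v0 : Int) (t : List (String × Int)) :
    ((PySem.List.pyRange 0 (((v0 :: t.map Prod.snd).length : Nat) : Int) 1).foldl
        (fun m i => if PySem.List.pyGetD (v0 :: t.map Prod.snd) i 0 > m
                    then PySem.List.pyGetD (v0 :: t.map Prod.snd) i 0 else m)
        (PySem.List.pyGetD (v0 :: t.map Prod.snd) 0 0)) = pvFmax v0 t := by
  rw [PySem.List.foldl_pyRange_zero_pyGetD' (v0 :: t.map Prod.snd) 0
        (fun m v => if v > m then v else m)]
  have h0 : PySem.List.pyGetD (v0 :: t.map Prod.snd) 0 0 = v0 := by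
    rw [PySem.List.pyGetD_eq_getElem _ _ le_rfl (by simp)]; rfl
  rw [h0]
  simp only [List.foldl_cons, ite_self]
  rw [List.foldl_map]
  rfl

-- ===== VERDICT (by name: the statement is the Claim_ definition above) =====
theorem best_score_spec : Claim_equal_best_score := by
  intro d _ hpre
  unfold Spec_best_score
  match d with
  | [] => rfl
  | (k0, v0) :: t =>
      unfold best_score
      rw [if_pos (by simp)]
      have hvals : ((k0, v0) :: t).foldl (fun acc p => acc ++ [p.2]) [] = v0 :: t.map Prod.snd := by
        rw [pvFoldlAppend]; rfl
      simp only [hvals]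
      rw [pvMaxLoopEq v0 t]
      rw [pvScanEq ((k0, v0) :: t) ((k0, v0) :: t) (pvFmax v0 t)
            (fun p hp => pvLookupNodup _ hpre p.1 p.2 hp)]
      rw [best_score_alt, pvAltEq t k0 v0]
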